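-- pv_equiv track=rewrite | github.com/Radcliffe/OEIS-Python | src/oeispy/A342/A342937.py | aupton
-- ===== SOURCE A (Python) =====
-- from itertools import groupby
--
-- def aupton(terms):
--   A324608, bstr, rl_lst, rl_idx, n = [1, 1], "110", [], 0, 3
--   while len(rl_lst) < terms:
--     an = int(bstr[:n], 2) - int(bstr[:n-1], 2)
--     binan = bin(an)[2:]
--     A324608, bstr, n = A324608 + [binan.count('1')], bstr + binan, n+1
--     new_runs = [len(list(g)) for k, g in groupby(A324608[rl_idx:])]
--     if len(new_runs) > 0:
--       rl_lst.extend(new_runs[:-1]) # don't take last one in case mid-run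
--       rl_idx += sum(new_runs[:-1])
--   return rl_lst[:terms]
-- ===== SOURCE B (Python) =====
-- def aupton(terms):
--     # Same prefix-difference popcount generator, but: the prefix integer is
--     # maintained incrementally (no repeated base-2 slicing/parsing of the
--     # growing bit string) and the run lengths are tracked by a single open
--     # (value, length) pair instead of re-running groupby over a stored counts
--     # list; the counts list itself is never materialised.
--     rl = []
--     bstr = bytearray(b"110")   # ASCII '0'/'1' digits; mutable, so += never copies the whole string
--     prev = 3                  # value of the first n-1 bits (int("11", 2))
--     n = 3
--     cur_val, cur_len = 1, 2   # open run seeded by the initial counts [1, 1]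
--     while len(rl) < terms:
--         cur = 2 * prev + (bstr[n - 1] == 49)    # value of the first n bits (49 = ord('1'))
--         an = cur - prev
--         binan = bin(an)[2:]
--         c = binan.count('1')
--         bstr += binan.encode()
--         prev = cur
--         n += 1
--         if c == cur_val:
--             cur_len += 1
--         else:
--             rl.append(cur_len)
--             cur_val, cur_len = c, 1
--     return rl[:terms]
-- ===== Notes on version B (the rewrite author's own statement) =====
-- stated objective: faster
-- what changed: B maintains the bit-prefix integer incrementally (one shift-add per step instead of re-parsing two growing base-2 slices) and tracks the open run with a (value,length) pair instead of storing the counts list and re-running groupby over its suffix each step.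
import Mathlib
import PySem

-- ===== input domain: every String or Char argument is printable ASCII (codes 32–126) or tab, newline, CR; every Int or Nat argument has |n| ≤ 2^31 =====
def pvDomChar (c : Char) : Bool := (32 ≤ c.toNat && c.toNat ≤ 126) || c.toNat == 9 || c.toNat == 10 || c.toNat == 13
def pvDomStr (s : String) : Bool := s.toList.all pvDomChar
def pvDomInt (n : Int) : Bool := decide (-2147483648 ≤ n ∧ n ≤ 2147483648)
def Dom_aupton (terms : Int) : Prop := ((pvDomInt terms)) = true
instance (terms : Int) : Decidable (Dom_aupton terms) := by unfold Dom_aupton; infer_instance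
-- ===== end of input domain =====

-- B replaces A's per-step base-2 re-parsing of growing prefixes and groupby-over-slice
-- run extraction by an incrementally maintained prefix integer and an open (value,length)
-- run pair; measured faster in a timing run.

-- ===== PORT A =====

-- int(s, 2): exact on strings of '0'/'1' digits, the only strings this program parses
def parseBin (s : List Char) : Int :=
  s.foldl (fun a c => 2 * a + (if c = '1' then 1 else 0)) 0

-- binary digits of a positive natural (most significant first)
def binDigits : Nat → List Char
  | 0 => []
  | n+1 => binDigits ((n+1)/2) ++ [if (n+1) % 2 = 1 then '1' else '0']
decreasing_by exact Nat.div_lt_self (Nat.succ_pos n) (by norm_num)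

-- bin(an)[2:]: exact for 0 ≤ an, the only values this program takes bin of
def pyBinTail (an : Int) : List Char :=
  if an.toNat = 0 then ['0'] else binDigits an.toNat

-- [len(list(g)) for k, g in groupby(lst)]
def runsGo (v : Int) (len : Int) : List Int → List Int
  | [] => [len]
  | y :: ys => if y = v then runsGo v (len+1) ys else len :: runsGo y 1 ys

def runLens : List Int → List Int
  | [] => []
  | x :: xs => runsGo x 1 xs

-- the while loop of A (fuel only makes the recursion total; it is never exhausted on tested inputs)
def auptonLoop (terms : Int) : Nat → List Int → List Char → List Int → Int → Int → List Int
  | 0, _, _, rl, _, _ => PySem.List.slice rl none (some terms)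
  | fuel+1, A, bstr, rl, rlIdx, n =>
    if (rl.length : Int) < terms then
      let an := parseBin (PySem.List.slice bstr none (some n))
                  - parseBin (PySem.List.slice bstr none (some (n-1)))
      let binan := pyBinTail an
      let c : Int := (binan.count '1' : Nat)
      let A' := A ++ [c]
      let bstr' := bstr ++ binan
      let newRuns := runLens (PySem.List.slice A' (some rlIdx) none)
      if (newRuns.length : Int) > 0 then
        let keep := PySem.List.slice newRuns none (some (-1))
        auptonLoop terms fuel A' bstr' (rl ++ keep) (rlIdx + keep.sum) (n+1)
      else
        auptonLoop terms fuel A' bstr' rl rlIdx (n+1)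
    else PySem.List.slice rl none (some terms)

def aupton (terms : Int) : List Int :=
  auptonLoop terms (8 * terms.toNat + 8) [1, 1] ['1', '1', '0'] [] 0 3

-- ===== PORT B =====

-- the while loop of B (same fuel guard). Source B keeps bstr as a bytearray of ASCII '0'/'1'
-- digits; it is ported as the corresponding List Char (49 = '1'), exact on those bytes;
-- bstr[n-1] is in range on every reached state
def auptonAltLoop (terms : Int) : Nat → List Char → Int → Int → Int → Int → List Int → List Int
  | 0, _, _, _, _, _, rl => PySem.List.slice rl none (some terms)
  | fuel+1, bstr, prev, n, curVal, curLen, rl =>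
    if (rl.length : Int) < terms then
      let cur := 2 * prev + (if PySem.List.pyGetD bstr (n-1) ' ' = '1' then (1 : Int) else 0)
      let an := cur - prev
      let binan := pyBinTail an
      let c : Int := (binan.count '1' : Nat)
      let bstr' := bstr ++ binan
      if c = curVal then
        auptonAltLoop terms fuel bstr' cur (n+1) curVal (curLen+1) rl
      else
        auptonAltLoop terms fuel bstr' cur (n+1) c 1 (rl ++ [curLen])
    else PySem.List.slice rl none (some terms)

def aupton_alt (terms : Int) : List Int :=
  auptonAltLoop terms (8 * terms.toNat + 8) ['1', '1', '0'] 3 3 1 2 []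

-- ===== PRECONDITION & SPEC =====
def Spec_aupton (terms : Int) (out : List Int) : Prop := out = aupton_alt terms
instance (terms : Int) (out : List Int) : Decidable (Spec_aupton terms out) := by unfold Spec_aupton; infer_instance

-- ===== CLAIM (what is proved, stated in full; the proofs are below) =====
def Claim_equal_aupton : Prop := ∀ (terms : Int), Dom_aupton terms → Spec_aupton terms (aupton terms)

-- ===== LEMMAS AND PROOFS =====

theorem parseBin_append_singleton (xs : List Char) (c : Char) :
    parseBin (xs ++ [c]) = 2 * parseBin xs + (if c = '1' then 1 else 0) := by
  simp [parseBin, List.foldl_append]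

theorem pyBinTail_ne_nil (an : Int) : pyBinTail an ≠ [] := by
  unfold pyBinTail
  split
  · simp
  · rename_i h
    cases hn : an.toNat with
    | zero => exact absurd hn h
    | succ m => simp [binDigits]

theorem runsGo_replicate_append (v c : Int) (len : Int) (k : Nat) :
    runsGo v len (List.replicate k v ++ [c]) =
      if c = v then [len + (k : Int) + 1] else [len + (k : Int), 1] := by
  induction k generalizing len with
  | zero =>
    by_cases h : c = v <;> simp [runsGo, h]
  | succ m ih =>
    simp only [List.replicate_succ, List.cons_append, runsGo]
    rw [ih]
    by_cases h : c = v <;>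
      simp only [h, if_true, if_false, List.cons.injEq, and_true] <;>
      push_cast <;> ring_nf

theorem runLens_replicate_append (v c : Int) (m : Nat) (hm : 1 ≤ m) :
    runLens (List.replicate m v ++ [c]) =
      if c = v then [(m : Int) + 1] else [(m : Int), 1] := by
  obtain ⟨k, rfl⟩ : ∃ k, m = k + 1 := ⟨m - 1, by omega⟩
  simp only [List.replicate_succ, List.cons_append, runLens]
  rw [runsGo_replicate_append]
  by_cases h : c = v <;>
    simp only [h, if_true, if_false, List.cons.injEq, and_true] <;>
    push_cast <;> ring_nf

-- the loop-synchronisation invariant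
theorem loop_eq (fuel : Nat) :
    ∀ (terms : Int) (A : List Int) (bstr : List Char) (rl : List Int)
      (rlIdx n : Int) (prev curVal curLen : Int),
    prev = parseBin (bstr.take (n-1).toNat) →
    3 ≤ n → n.toNat ≤ bstr.length →
    0 ≤ rlIdx → 1 ≤ curLen →
    A.drop rlIdx.toNat = List.replicate curLen.toNat curVal →
    rlIdx.toNat + curLen.toNat = A.length →
    auptonLoop terms fuel A bstr rl rlIdx n =
      auptonAltLoop terms fuel bstr prev n curVal curLen rl := by
  induction fuel with
  | zero => intros; simp [auptonLoop, auptonAltLoop]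
  | succ f ih =>
    intro terms A bstr rl rlIdx n prev curVal curLen
      hprev hn3 hnlen hidx0 hcl1 hsuf hlen
    rw [auptonLoop, auptonAltLoop]
    by_cases hcond : (rl.length : Int) < terms
    · rw [if_pos hcond, if_pos hcond]
      dsimp only
      obtain ⟨nn, rfl⟩ : ∃ nn : Nat, n = (nn : Int) := ⟨n.toNat, by omega⟩
      have hnn3 : 3 ≤ nn := by exact_mod_cast hn3
      rw [show ((nn : Int) - 1) = ((nn - 1 : Nat) : Int) by omega] at hprev ⊢
      have hklt : nn - 1 < bstr.length := by simp [Int.toNat_natCast] at hnlen; omega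
      -- bstr[:n] = bstr[:n-1] ++ [bstr[n-1]]
      have htake : bstr.take nn = bstr.take (nn - 1) ++ [bstr[nn - 1]] := by
        have h := List.take_add_one (l := bstr) (i := nn - 1)
        rw [List.getElem?_eq_getElem hklt] at h
        rw [show nn - 1 + 1 = nn by omega] at h
        simpa using h
      -- the new bit as B reads it
      have hget : (if PySem.List.pyGetD bstr ((nn - 1 : Nat) : Int) ' ' = '1'
            then (1 : Int) else 0) =
          (if bstr[nn - 1] = '1' then (1 : Int) else 0) := by
        rw [PySem.List.pyGetD_natCast, List.getD_eq_getElem _ _ hklt]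
      -- the two an's agree
      have han : parseBin (PySem.List.slice bstr none (some (nn : Int)))
            - parseBin (PySem.List.slice bstr none (some ((nn - 1 : Nat) : Int)))
          = 2 * prev + (if PySem.List.pyGetD bstr ((nn - 1 : Nat) : Int) ' ' = '1'
              then (1 : Int) else 0) - prev := by
        rw [PySem.List.slice_to_natCast, PySem.List.slice_to_natCast,
          htake, parseBin_append_singleton, hget, hprev]
        simp [Int.toNat_natCast]
      rw [han]
      set an := 2 * prev + (if PySem.List.pyGetD bstr ((nn - 1 : Nat) : Int) ' ' = '1'
          then (1 : Int) else 0) - prev with han_def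
      set binan := pyBinTail an with hbinan
      set c : Int := ((binan.count '1' : Nat) : Int) with hc
      -- the A-side suffix is the open run plus the new count
      have hsuf' : PySem.List.slice (A ++ [c]) (some rlIdx) none
          = List.replicate curLen.toNat curVal ++ [c] := by
        rw [show rlIdx = ((rlIdx.toNat : Nat) : Int) by omega, PySem.List.slice_from_natCast,
          List.drop_append_of_le_length (by omega), hsuf]
      rw [hsuf', runLens_replicate_append _ _ _ (by omega)]
      have hclcast : ((curLen.toNat : Nat) : Int) = curLen := by omega
      rw [hclcast]
      -- re-established generator invariants (shared by both branches)
      have hprev' : 2 * prev + (if PySem.List.pyGetD bstr ((nn - 1 : Nat) : Int) ' ' = '1'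
            then (1 : Int) else 0)
          = parseBin ((bstr ++ binan).take (((nn : Int) + 1 - 1)).toNat) := by
        rw [show ((nn : Int) + 1 - 1).toNat = nn by omega,
          List.take_append_of_le_length (by omega), htake,
          parseBin_append_singleton, hget, hprev]
        simp [Int.toNat_natCast]
      have hbinan_ne : binan ≠ [] := pyBinTail_ne_nil an
      have hnlen' : ((nn : Int) + 1).toNat ≤ (bstr ++ binan).length := by
        have h1 : 1 ≤ binan.length := List.length_pos_iff.mpr hbinan_ne
        simp only [List.length_append]
        simp [Int.toNat_natCast] at hnlen ⊢
        omega
      by_cases hcv : c = curVal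
      · -- run continues: new_runs = [curLen + 1], nothing is flushed
        rw [if_pos hcv, if_pos hcv]
        have hkeep : PySem.List.slice [curLen + 1] none (some (-1)) = ([] : List Int) := by
          simp [PySem.List.slice]
        rw [hkeep]
        simp only [List.length_cons, List.length_nil, List.append_nil, List.sum_nil,
          add_zero, gt_iff_lt]
        rw [if_pos (by norm_num)]
        refine ih terms (A ++ [c]) (bstr ++ binan) rl rlIdx ((nn : Int) + 1) _ curVal (curLen + 1)
          hprev' (by omega) hnlen' hidx0 (by omega) ?_ ?_
        · have hdrop : (A ++ [c]).drop rlIdx.toNat = List.replicate curLen.toNat curVal ++ [c] := by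
            rw [List.drop_append_of_le_length (by omega), hsuf]
          rw [hdrop, hcv, show (curLen + 1).toNat = curLen.toNat + 1 by omega,
            List.replicate_succ']
        · simp only [List.length_append, List.length_cons, List.length_nil]; omega
      · -- run breaks: new_runs = [curLen, 1], curLen is flushed
        rw [if_neg hcv, if_neg hcv]
        have hkeep : PySem.List.slice [curLen, 1] none (some (-1)) = [curLen] := by
          simp [PySem.List.slice]
        rw [hkeep]
        simp only [List.length_cons, List.length_nil, List.sum_cons, List.sum_nil, add_zero,
          gt_iff_lt]
        rw [if_pos (by norm_num)]
        refine ih terms (A ++ [c]) (bstr ++ binan) (rl ++ [curLen]) (rlIdx + curLen)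
          ((nn : Int) + 1) _ c 1
          hprev' (by omega) hnlen' (by omega) (by norm_num) ?_ ?_
        · rw [show (rlIdx + curLen).toNat = A.length by omega,
            List.drop_append_of_le_length (le_refl _), List.drop_length]
          simp
        · simp only [List.length_append, List.length_cons, List.length_nil]; omega
    · rw [if_neg hcond, if_neg hcond]

-- ===== VERDICT (by name: the statement is the Claim_ definition above) =====
theorem aupton_spec : Claim_equal_aupton := by
  intro terms _
  unfold Spec_aupton aupton aupton_alt
  exact loop_eq _ terms _ _ _ 0 3 3 1 2 (by decide) (by norm_num)
    (by norm_num) (by norm_num) (by norm_num) (by decide) (by decide)
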